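-- pv_equiv track=rewrite | github.com/cesarnml/mooc-programming-25 | part04-37_neighbours_in_list/src/neighbours_in_list.py | longest_series_of_neighbours
-- ===== SOURCE A (Python) =====
-- def longest_series_of_neighbours(numbers):
--     longest = 1
--     longest_so_far = 1
--     length = len(numbers)
--     for i in range(length - 1):
--         if abs(numbers[i] - numbers[i + 1]) == 1:
--             longest_so_far += 1
--             if longest_so_far > longest:  # Only update when we find a longer series
--                 longest = longest_so_far
--         else:
--             longest_so_far = 1  # Reset to 1, not 0
--     return longest
-- ===== SOURCE B (Python) =====
-- def longest_series_of_neighbours(numbers):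
--     # Derive the break positions of the neighbour-adjacency sequence, then
--     # the answer is 1 + the widest gap between consecutive breaks.
--     bounds = [-1]
--     for i, (x, y) in enumerate(zip(numbers, numbers[1:])):
--         if abs(x - y) != 1:
--             bounds.append(i)
--     bounds.append(len(numbers) - 1)
--     return 1 + max(max(b2 - b1 - 1, 0) for b1, b2 in zip(bounds, bounds[1:]))
-- ===== Notes on version B (the rewrite author's own statement) =====
-- stated objective: alternative
-- what changed: Replaces A's running-counter-with-reset scan by deriving the break positions of the neighbour-adjacency sequence and returning 1 + the widest gap between consecutive break positions (with sentinels -1 and len-1).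
import Mathlib
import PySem

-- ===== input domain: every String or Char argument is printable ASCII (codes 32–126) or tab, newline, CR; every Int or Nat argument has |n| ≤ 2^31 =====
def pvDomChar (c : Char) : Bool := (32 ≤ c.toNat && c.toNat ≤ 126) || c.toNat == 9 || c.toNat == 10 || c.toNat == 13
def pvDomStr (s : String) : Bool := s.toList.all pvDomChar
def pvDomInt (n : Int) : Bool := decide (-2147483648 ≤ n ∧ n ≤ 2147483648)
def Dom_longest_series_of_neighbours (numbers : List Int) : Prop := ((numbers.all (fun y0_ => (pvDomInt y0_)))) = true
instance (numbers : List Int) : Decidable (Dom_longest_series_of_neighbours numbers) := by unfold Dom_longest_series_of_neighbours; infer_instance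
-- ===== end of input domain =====

-- B replaces A's running-counter scan by deriving the break positions of the
-- neighbour-adjacency sequence and returning 1 + the widest gap between
-- consecutive breaks (objective: alternative, same O(n) cost).

-- ===== PORT A =====
def longest_series_of_neighbours (numbers : List Int) : Int :=
  let longest : Int := 1
  let longest_so_far : Int := 1
  let length : Int := PySem.List.len numbers
  let st :=
    (PySem.List.pyRange 0 (length - 1) 1).foldl
      (fun (st : Int × Int) i =>
        -- i is always in range, so pyGetD's default is never used
        if ((PySem.List.pyGetD numbers i 0) - (PySem.List.pyGetD numbers (i + 1) 0)).natAbs = 1 then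
          if st.2 + 1 > st.1 then (st.2 + 1, st.2 + 1) else (st.1, st.2 + 1)
        else
          (st.1, 1))
      (longest, longest_so_far)
  st.1

-- ===== PORT B =====
def longest_series_of_neighbours_alt (numbers : List Int) : Int :=
  let pairs := numbers.zip (PySem.List.slice numbers (some 1) none)
  let bounds :=
    (PySem.List.enumerate pairs 0).foldl
      (fun acc q => if (q.2.1 - q.2.2).natAbs ≠ 1 then acc ++ [q.1] else acc)
      [(-1 : Int)]
  let bounds' := bounds ++ [PySem.List.len numbers - 1]
  let gaps := (bounds'.zip (PySem.List.slice bounds' (some 1) none)).map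
      (fun q => max (q.2 - q.1 - 1) 0)
  -- gaps is never empty (bounds' has ≥ 2 elements), so Python's max never raises
  1 + (PySem.List.max? gaps (fun y => y)).getD 0

-- ===== PRECONDITION & SPEC =====
def Spec_longest_series_of_neighbours (numbers : List Int) (out : Int) : Prop := out = longest_series_of_neighbours_alt numbers
instance (numbers : List Int) (out : Int) : Decidable (Spec_longest_series_of_neighbours numbers out) := by unfold Spec_longest_series_of_neighbours; infer_instance

-- ===== CLAIM (what is proved, stated in full; the proofs are below) =====
def Claim_equal_longest_series_of_neighbours : Prop := ∀ (numbers : List Int), Dom_longest_series_of_neighbours numbers → Spec_longest_series_of_neighbours numbers (longest_series_of_neighbours numbers)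

-- ===== LEMMAS AND PROOFS =====

-- the adjacency bit of one pair of neighbouring entries
def pvAdj (p : Int × Int) : Bool := decide ((p.1 - p.2).natAbs = 1)

-- length of the true-prefix of the adjacency sequence
def pvLead : List Bool → Int
  | [] => 0
  | true :: t => 1 + pvLead t
  | false :: _ => 0

-- length of the longest true-run of the adjacency sequence
def pvRun : List Bool → Int
  | [] => 0
  | b :: t => max (pvLead (b :: t)) (pvRun t)

-- positions (offset s) of the false entries
def pvFpo : List Bool → Int → List Int
  | [], _ => []
  | true :: t, s => pvFpo t (s + 1)
  | false :: t, s => s :: pvFpo t (s + 1)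

-- widest gap (clipped at 0) between consecutive entries of prev :: l
def pvMg : Int → List Int → Int
  | _, [] => 0
  | p, x :: xs => max (max (x - p - 1) 0) (pvMg x xs)

theorem pvLead_nonneg : ∀ d : List Bool, 0 ≤ pvLead d
  | [] => le_refl 0
  | true :: t => by have := pvLead_nonneg t; simp [pvLead]; omega
  | false :: _ => le_refl 0

theorem pvRun_nonneg : ∀ d : List Bool, 0 ≤ pvRun d
  | [] => le_refl 0
  | b :: t => by
      have := pvRun_nonneg t
      simp [pvRun]; omega

theorem pvLead_le_pvRun : ∀ d : List Bool, pvLead d ≤ pvRun d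
  | [] => le_refl 0
  | b :: t => by simp [pvRun]

-- A's loop over the adjacency sequence, characterised
theorem pvAfold (d : List Bool) : ∀ L c : Int, 1 ≤ c → c ≤ L →
    (d.foldl (fun (st : Int × Int) b =>
        if b then
          if st.2 + 1 > st.1 then (st.2 + 1, st.2 + 1) else (st.1, st.2 + 1)
        else (st.1, 1)) (L, c)).1
      = max L (max (c + pvLead d) (1 + pvRun d)) := by
  induction d with
  | nil =>
      intro L c h1 h2
      simp [pvLead, pvRun]
      omega
  | cons b t ih =>
      intro L c h1 h2
      have hl := pvLead_nonneg t
      have hr := pvRun_nonneg t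
      have hlr := pvLead_le_pvRun t
      cases b with
      | true =>
          simp only [List.foldl_cons, if_true, pvLead, pvRun]
          by_cases h : c + 1 > L
          · rw [if_pos h, ih (c + 1) (c + 1) (by omega) (by omega)]
            omega
          · rw [if_neg h, ih L (c + 1) (by omega) (by omega)]
            omega
      | false =>
          simp only [List.foldl_cons, Bool.false_eq_true, if_false, pvLead, pvRun]
          rw [ih L 1 (by omega) (by omega)]
          omega

-- the indexed pairs A reads are exactly the zip of the list with its tail
theorem pvRangePairs (xs : List Int) :
    (List.range (xs.length - 1)).map (fun k => ((xs.getD k 0 : Int), xs.getD (k + 1) 0))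
      = xs.zip xs.tail := by
  induction xs with
  | nil => simp
  | cons x t ih =>
      cases t with
      | nil => simp
      | cons y u =>
          have hlen : (x :: y :: u).length - 1 = ((y :: u).length - 1) + 1 := by
            simp
          rw [hlen, List.range_succ_eq_map, List.map_cons, List.map_map]
          have hfun : ((fun k => (((x :: y :: u).getD k 0 : Int), (x :: y :: u).getD (k + 1) 0)) ∘ Nat.succ)
              = fun k => (((y :: u).getD k 0 : Int), (y :: u).getD (k + 1) 0) := by
            funext k
            simp [Function.comp]
          rw [hfun, ih]
          simp

-- A's fold over pyRange equals the fold of the same step over the adjacency bits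
theorem pvFoldA (xs : List Int) (st : Int × Int) :
    (PySem.List.pyRange 0 (PySem.List.len xs - 1) 1).foldl
      (fun (st : Int × Int) i =>
        if ((PySem.List.pyGetD xs i 0) - (PySem.List.pyGetD xs (i + 1) 0)).natAbs = 1 then
          if st.2 + 1 > st.1 then (st.2 + 1, st.2 + 1) else (st.1, st.2 + 1)
        else (st.1, 1)) st
    = ((xs.zip xs.tail).map pvAdj).foldl (fun (st : Int × Int) b =>
        if b then
          if st.2 + 1 > st.1 then (st.2 + 1, st.2 + 1) else (st.1, st.2 + 1)
        else (st.1, 1)) st := by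
  rw [← pvRangePairs xs, PySem.List.pyRange_one, List.foldl_map, List.map_map, List.foldl_map]
  have htn : ((PySem.List.len xs - 1) - 0).toNat = xs.length - 1 := by
    simp [PySem.List.len]
  rw [htn]
  refine List.foldl_ext _ _ _ ?_
  intro st' k _
  have h2 : PySem.List.pyGetD xs ((k : Int) + 1) 0 = xs.getD (k + 1) 0 := by
    rw [show ((k : Int) + 1) = ((k + 1 : Nat) : Int) by push_cast; ring]
    exact PySem.List.pyGetD_natCast xs (k + 1) 0
  simp [Function.comp, h2, PySem.List.pyGetD_natCast, pvAdj]

-- B's appending loop over the enumerated pairs collects exactly the false positions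
theorem pvFoldBounds : ∀ (pl : List (Int × Int)) (s : Int) (acc : List Int),
    (PySem.List.enumerate pl s).foldl
        (fun acc q => if (q.2.1 - q.2.2).natAbs ≠ 1 then acc ++ [q.1] else acc) acc
      = acc ++ pvFpo (pl.map pvAdj) s := by
  intro pl
  induction pl with
  | nil => intro s acc; simp [PySem.List.enumerate_nil, pvFpo]
  | cons p t ih =>
      intro s acc
      rw [PySem.List.enumerate_cons, List.foldl_cons]
      by_cases h : (p.1 - p.2).natAbs = 1
      · simp only [h, ne_eq, not_true_eq_false, if_false, List.map_cons, pvAdj, decide_true, pvFpo]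
        exact ih (s + 1) acc
      · simp only [h, ne_eq, not_false_eq_true, if_true, List.map_cons, pvAdj, decide_false, pvFpo]
        rw [ih (s + 1)]
        simp

-- running max over the mapped gap list equals the structural pvMg
theorem pvFoldMax : ∀ (xs : List Int) (x a : Int), 0 ≤ a →
    (((x :: xs).zip xs).map (fun q => max (q.2 - q.1 - 1) 0)).foldl max a
      = max a (pvMg x xs) := by
  intro xs
  induction xs with
  | nil => intro x a ha; simp [pvMg]; omega
  | cons y ys ih =>
      intro x a ha
      simp only [List.zip_cons_cons, List.map_cons, List.foldl_cons, pvMg]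
      rw [ih y (max a (max (y - x - 1) 0)) (by omega)]
      omega

-- Python's max over the gap generator equals pvMg
theorem pvMgMax (l : List Int) (p : Int) (h : l ≠ []) :
    (PySem.List.max? (((p :: l).zip ((p :: l).tail)).map (fun q => max (q.2 - q.1 - 1) 0))
        (fun y => y)).getD 0 = pvMg p l := by
  cases l with
  | nil => exact absurd rfl h
  | cons x xs =>
      simp only [List.tail_cons, List.zip_cons_cons, List.map_cons]
      rw [PySem.List.max?_id_cons, Option.getD_some, pvFoldMax xs x _ (by omega)]
      simp [pvMg]

-- the gap computation over the false positions plus sentinel yields the longest run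
theorem pvMgFpo : ∀ (d : List Bool) (s p : Int), p ≤ s →
    pvMg (p - 1) (pvFpo d s ++ [s + (d.length : Int)])
      = max ((s - p) + pvLead d) (pvRun d) := by
  intro d
  induction d with
  | nil =>
      intro s p hp
      simp [pvFpo, pvMg, pvLead, pvRun]
      omega
  | cons b t ih =>
      intro s p hp
      have hl := pvLead_nonneg t
      have hr := pvRun_nonneg t
      have hlr := pvLead_le_pvRun t
      cases b with
      | true =>
          simp only [pvFpo, pvLead, pvRun, List.length_cons]
          have : s + ((t.length + 1 : Nat) : Int) = (s + 1) + (t.length : Int) := by push_cast; ring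
          rw [this, ih (s + 1) p (by omega)]
          omega
      | false =>
          simp only [pvFpo, pvLead, pvRun, List.length_cons, List.cons_append, pvMg]
          have : s + ((t.length + 1 : Nat) : Int) = (s + 1) + (t.length : Int) := by push_cast; ring
          rw [this]
          have h2 := ih (s + 1) (s + 1) (by omega)
          rw [show (s + 1) - 1 = s by ring] at h2
          rw [h2]
          omega

theorem pvAltChar (xs : List Int) (h : xs ≠ []) :
    longest_series_of_neighbours_alt xs = 1 + pvRun ((xs.zip xs.tail).map pvAdj) := by
  have hlen : ((xs.zip xs.tail).map pvAdj).length = xs.length - 1 := by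
    cases xs with
    | nil => simp
    | cons x t =>
        simp only [List.length_map, List.length_zip, List.length_tail, List.length_cons]
        omega
  unfold longest_series_of_neighbours_alt
  simp only [PySem.List.slice_from_one]
  rw [pvFoldBounds (xs.zip xs.tail) 0 [(-1 : Int)]]
  have hsent : PySem.List.len xs - 1 = (0 : Int) + (((xs.zip xs.tail).map pvAdj).length : Int) := by
    rw [hlen]
    simp only [PySem.List.len_eq]
    cases xs with
    | nil => exact absurd rfl h
    | cons x t =>
        simp only [List.length_cons]
        omega
  rw [hsent]
  have hne : pvFpo ((xs.zip xs.tail).map pvAdj) 0 ++ [(0 : Int) + (((xs.zip xs.tail).map pvAdj).length : Int)] ≠ [] := by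
    simp
  rw [show ([(-1 : Int)] ++ pvFpo ((xs.zip xs.tail).map pvAdj) 0)
        ++ [(0 : Int) + (((xs.zip xs.tail).map pvAdj).length : Int)]
      = (-1 : Int) :: (pvFpo ((xs.zip xs.tail).map pvAdj) 0
        ++ [(0 : Int) + (((xs.zip xs.tail).map pvAdj).length : Int)]) by simp]
  rw [pvMgMax _ _ hne]
  rw [show (-1 : Int) = (0 : Int) - 1 by ring]
  rw [pvMgFpo _ 0 0 (by omega)]
  have := pvLead_le_pvRun ((xs.zip xs.tail).map pvAdj)
  omega

theorem pvAChar (xs : List Int) :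
    longest_series_of_neighbours xs = 1 + pvRun ((xs.zip xs.tail).map pvAdj) := by
  unfold longest_series_of_neighbours
  simp only []
  rw [pvFoldA xs (1, 1), pvAfold _ 1 1 (by omega) (by omega)]
  have h1 := pvLead_nonneg ((xs.zip xs.tail).map pvAdj)
  have h2 := pvRun_nonneg ((xs.zip xs.tail).map pvAdj)
  have h3 := pvLead_le_pvRun ((xs.zip xs.tail).map pvAdj)
  omega

-- ===== VERDICT (by name: the statement is the Claim_ definition above) =====
theorem longest_series_of_neighbours_spec : Claim_equal_longest_series_of_neighbours := by
  intro numbers _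
  unfold Spec_longest_series_of_neighbours
  cases hn : numbers with
  | nil => decide
  | cons x t =>
      rw [pvAChar, pvAltChar _ (by simp)]
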